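-- pv_equiv track=rewrite | github.com/jacob-fenster/NGS_gRNA | test_data/pMSA_algorithm/scripts/pMSA.py | dict_builder_longer
-- ===== SOURCE A (Python) =====
-- def dict_builder_longer(seqs, labs, codes):
-- #this inputs three lists of a3m alignments, unique labels, and non-unique codes and builds a dictionary
-- #if multiple codes, takes longest of the entries so each code is unique {code:[lab, seq]}
-- #option to add more logic later for alignments that have multiple hits etc
--     result_dict = {}
--     for code, lab, seq in zip(codes, labs, seqs):
--         if code not in result_dict:
--             result_dict[code] = [lab, seq]
--         else: #see if current sequence is longer than existing sequence
--             existing_seq = result_dict[code][1]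
--             if len(seq.replace('-','').replace('.','')) > len(existing_seq.replace('-','').replace('.','')):
--                 result_dict[code] = [lab, seq]
--     return result_dict
-- ===== SOURCE B (Python) =====
-- def dict_builder_longer(seqs, labs, codes):
--     # Two-pass: group all [lab, seq] pairs per code, then pick each group's
--     # first-longest pair with max (first maximum = A's strict-'>' first-wins rule).
--     groups = {}
--     for code, lab, seq in zip(codes, labs, seqs):
--         groups.setdefault(code, []).append([lab, seq])
--     return {code: max(pairs, key=lambda p: len(p[1].replace('-', '').replace('.', '')))
--             for code, pairs in groups.items()}
-- ===== Notes on version B (the rewrite author's own statement) =====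
-- stated objective: alternative
-- what changed: B replaces A's single-pass compare-and-overwrite dict loop by a two-pass decomposition: first group all [lab, seq] pairs per code in encounter order, then pick each group's first-longest pair with the builtin max (first-maximum semantics matches A's strict-'>' first-wins rule).
import Mathlib
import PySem

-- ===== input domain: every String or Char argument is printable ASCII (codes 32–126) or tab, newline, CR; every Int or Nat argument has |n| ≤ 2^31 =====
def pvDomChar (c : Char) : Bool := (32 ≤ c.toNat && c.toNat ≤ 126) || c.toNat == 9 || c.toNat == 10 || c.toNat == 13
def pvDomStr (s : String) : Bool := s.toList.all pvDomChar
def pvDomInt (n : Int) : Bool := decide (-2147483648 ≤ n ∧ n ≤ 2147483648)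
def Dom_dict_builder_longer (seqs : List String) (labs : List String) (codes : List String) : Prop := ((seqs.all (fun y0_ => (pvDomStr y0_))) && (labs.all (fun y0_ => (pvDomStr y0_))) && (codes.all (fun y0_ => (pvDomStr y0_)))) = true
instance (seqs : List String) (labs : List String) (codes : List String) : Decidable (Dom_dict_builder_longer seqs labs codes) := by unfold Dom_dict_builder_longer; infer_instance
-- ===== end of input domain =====

-- B groups [lab, seq] pairs per code first and then takes each group's first-longest
-- pair with max, instead of A's single-pass compare-and-overwrite loop (alternative decomposition, same cost).


-- ===== PORT A =====
-- len(s.replace('-','').replace('.',''))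
def pvClean (s : String) : Int :=
  PySem.Str.len (PySem.Str.replace (PySem.Str.replace s "-" "") "." "")

-- loop body of A; t = (code, (lab, seq)).  result_dict[code][1] is ported as
-- (pyGet? ex 1).getD "": every stored value is a two-element list [lab, seq], so index 1 always exists.
def pvStepA (d : PySem.Dict String (List String)) (t : String × String × String) :
    PySem.Dict String (List String) :=
  match d.get? t.1 with
  | none => d.insert t.1 [t.2.1, t.2.2]
  | some ex =>
      let existing_seq := (PySem.List.pyGet? ex 1).getD ""
      if pvClean t.2.2 > pvClean existing_seq then d.insert t.1 [t.2.1, t.2.2] else d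

def dict_builder_longer (seqs : List String) (labs : List String) (codes : List String) :
    List (String × List String) :=
  ((codes.zip (labs.zip seqs)).foldl pvStepA PySem.Dict.empty).items

-- ===== PORT B =====
-- key=lambda p: len(p[1].replace('-','').replace('.',''))  (p is always [lab, seq], so index 1 exists)
def pvKey (p : List String) : Int := pvClean ((PySem.List.pyGet? p 1).getD "")

-- groups.setdefault(code, []).append([lab, seq])  =  groups[code] = groups.get(code, []) + [[lab, seq]]
def pvStepG (g : PySem.Dict String (List (List String))) (t : String × String × String) :
    PySem.Dict String (List (List String)) :=
  g.modify t.1 [] (fun ps => ps ++ [[t.2.1, t.2.2]])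

def dict_builder_longer_alt (seqs : List String) (labs : List String) (codes : List String) :
    List (String × List String) :=
  let groups := (codes.zip (labs.zip seqs)).foldl pvStepG PySem.Dict.empty
  groups.items.map (fun p => (p.1, PySem.List.maxD p.2 pvKey []))

-- ===== PRECONDITION & SPEC =====
def Spec_dict_builder_longer (seqs : List String) (labs : List String) (codes : List String) (out : List (String × List String)) : Prop := out = dict_builder_longer_alt seqs labs codes
instance (seqs : List String) (labs : List String) (codes : List String) (out : List (String × List String)) : Decidable (Spec_dict_builder_longer seqs labs codes out) := by unfold Spec_dict_builder_longer; infer_instance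

-- ===== CLAIM (what is proved, stated in full; the proofs are below) =====
def Claim_equal_dict_builder_longer : Prop := ∀ (seqs : List String) (labs : List String) (codes : List String), Dom_dict_builder_longer seqs labs codes → Spec_dict_builder_longer seqs labs codes (dict_builder_longer seqs labs codes)

-- ===== LEMMAS AND PROOFS =====

-- the value transformation B applies to each group
def pvBest (ps : List (List String)) : List String := PySem.List.maxD ps pvKey []

def pvF (p : String × List (List String)) : String × List String := (p.1, pvBest p.2)

-- get? through a value-map (first-match lookup only reads keys)
theorem pv_get?_mapVals (l : List (String × List (List String))) (k : String) :
    (PySem.Dict.mk (l.map pvF)).get? k = ((PySem.Dict.mk l).get? k).map pvBest := by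
  induction l with
  | nil => rfl
  | cons p t ih =>
      simp only [List.map_cons, PySem.Dict.get?, List.find?] at *
      by_cases h : p.1 == k
      · simp [pvF, h]
      · simp only [pvF, h] at *
        simpa using ih

theorem pv_contains_mapVals (l : List (String × List (List String))) (k : String) :
    (PySem.Dict.mk (l.map pvF)).contains k = (PySem.Dict.mk l).contains k := by
  simp only [PySem.Dict.contains, List.any_map]
  rfl

theorem pv_keys_mapVals (l : List (String × List (List String))) :
    (PySem.Dict.mk (l.map pvF)).keys = (PySem.Dict.mk l).keys := by
  simp [PySem.Dict.keys, List.map_map, pvF, Function.comp]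

-- insert commutes with the value-map
theorem pv_insert_mapVals (l : List (String × List (List String))) (k : String)
    (w : List (List String)) :
    PySem.Dict.mk ((((PySem.Dict.mk l).insert k w)).items.map pvF) =
      (PySem.Dict.mk (l.map pvF)).insert k (pvBest w) := by
  simp only [PySem.Dict.insert, pv_contains_mapVals]
  by_cases h : (PySem.Dict.mk l).contains k
  · simp only [h, if_true, List.map_map]
    congr 1
    apply List.map_congr_left
    intro p _
    by_cases hp : p.1 == k <;> simp [pvF, hp, Function.comp]
  · simp [h, pvF]

-- inserting the value already (uniquely) stored at k changes nothing
theorem pv_insert_self {ν : Type} (d : PySem.Dict String ν) (k : String) (v : ν)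
    (hn : d.keys.Nodup) (hg : d.get? k = some v) : d.insert k v = d := by
  have hc : d.contains k = true := by
    rw [PySem.Dict.contains_eq_isSome_get?, hg]; rfl
  simp only [PySem.Dict.insert, hc, if_true]
  obtain ⟨items⟩ := d
  clear hc
  congr 1
  simp only [PySem.Dict.keys] at hn
  simp only [PySem.Dict.get?] at hg
  induction items with
  | nil => simp at hg
  | cons p t ih =>
      simp only [List.map_cons, List.find?] at *
      by_cases h : (p.1 == k) = true
      · simp only [h, Option.map_some, Option.some.injEq] at hg
        have hk : p.1 = k := eq_of_beq h
        have hnone : ∀ q ∈ t, ¬ ((q.1 == k) = true) := by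
          intro q hq hqk
          have : p.1 ∈ t.map Prod.fst := by
            rw [hk]; exact List.mem_map.mpr ⟨q, hq, eq_of_beq hqk⟩
          exact (List.nodup_cons.mp hn).1 this
        have ht : t.map (fun p => if (p.1 == k) = true then (k, v) else p) = t := by
          conv_rhs => rw [← List.map_id t]
          apply List.map_congr_left
          intro q hq; simp [hnone q hq]
        simp only [h, if_true, ht]
        rw [← hk, ← hg]
      · simp only [h] at hg
        simp only [List.nodup_cons] at hn
        simp only [h, List.cons.injEq]
        exact ⟨rfl, ih hn.2 hg⟩

theorem pv_best_append (ps : List (List String)) (m x : List String)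
    (hm : PySem.List.max? ps pvKey = some m) :
    pvBest (ps ++ [x]) = if pvKey m < pvKey x then x else m := by
  simp only [pvBest, PySem.List.maxD, PySem.List.max?] at *
  rw [List.foldl_append, hm]
  by_cases h : pvKey m < pvKey x <;> simp [List.foldl, h]

theorem pv_key_pair (a b : String) : pvKey [a, b] = pvClean b := by
  simp [pvKey, PySem.List.pyGet?, PySem.List.pyIdx?]

-- loop invariant: A's dict is B's grouping dict with each group replaced by its first-longest pair
theorem pv_loop (L : List (String × String × String)) :
    ∀ (g : PySem.Dict String (List (List String))),
      (∀ p ∈ g.items, p.2 ≠ []) → g.keys.Nodup →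
      L.foldl pvStepA (PySem.Dict.mk (g.items.map pvF)) =
        PySem.Dict.mk ((L.foldl pvStepG g).items.map pvF) := by
  induction L with
  | nil => intro g _ _; rfl
  | cons t L ih =>
      intro g h2 h3
      obtain ⟨c, lab, seq⟩ := t
      have hzip : pvStepG g (c, lab, seq) = g.insert c (g.getD c [] ++ [[lab, seq]]) := rfl
      simp only [List.foldl_cons]
      by_cases hc : g.contains c = true
      · -- code already grouped: A compares against the stored best
        obtain ⟨ps, hps⟩ : ∃ ps, g.get? c = some ps := by
          rw [PySem.Dict.contains_eq_isSome_get?] at hc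
          exact Option.isSome_iff_exists.mp hc
        have hpsne : ps ≠ [] := h2 (c, ps) (PySem.Dict.mem_items_of_get?_eq_some g hps)
        obtain ⟨m, hm⟩ : ∃ m, PySem.List.max? ps pvKey = some m := by
          rcases h : PySem.List.max? ps pvKey with _ | m
          · exact absurd ((PySem.List.max?_eq_none_iff ps pvKey).mp h) hpsne
          · exact ⟨m, rfl⟩
        have hbest : pvBest ps = m := by simp [pvBest, PySem.List.maxD, hm]
        have hdget : (PySem.Dict.mk (g.items.map pvF)).get? c = some m := by
          rw [pv_get?_mapVals g.items c]
          show (g.get? c).map pvBest = some m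
          rw [hps, Option.map_some, hbest]
        have hgd : g.getD c [] = ps := PySem.Dict.getD_of_get?_eq_some g [] hps
        have hA : pvStepA (PySem.Dict.mk (g.items.map pvF)) (c, lab, seq) =
            if pvKey m < pvClean seq
            then (PySem.Dict.mk (g.items.map pvF)).insert c [lab, seq]
            else PySem.Dict.mk (g.items.map pvF) := by
          simp only [pvStepA, hdget]
          rfl
        have hB : PySem.Dict.mk ((pvStepG g (c, lab, seq)).items.map pvF) =
            (PySem.Dict.mk (g.items.map pvF)).insert c (pvBest (ps ++ [[lab, seq]])) := by
          rw [hzip, hgd]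
          exact pv_insert_mapVals g.items c (ps ++ [[lab, seq]])
        have hstep : pvStepA (PySem.Dict.mk (g.items.map pvF)) (c, lab, seq) =
            PySem.Dict.mk ((pvStepG g (c, lab, seq)).items.map pvF) := by
          rw [hA, hB, pv_best_append ps m [lab, seq] hm, pv_key_pair]
          by_cases hlt : pvKey m < pvClean seq
          · simp [hlt]
          · simp only [hlt, if_false]
            exact (pv_insert_self _ c m (by rw [pv_keys_mapVals g.items]; exact h3) hdget).symm
        rw [hstep]
        apply ih
        · intro p hp
          rw [hzip, hgd] at hp
          rcases (PySem.Dict.mem_items_insert _ _ _ _).mp hp with h | h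
          · subst h; simp
          · exact h2 p h.1
        · rw [hzip]; exact PySem.Dict.nodup_keys_insert g c _ h3
      · -- first occurrence of the code: both sides append a fresh entry
        have hgn : g.get? c = none := by
          rcases h : g.get? c with _ | v
          · rfl
          · rw [PySem.Dict.contains_eq_isSome_get?, h] at hc; simp at hc
        have hdget : (PySem.Dict.mk (g.items.map pvF)).get? c = none := by
          rw [pv_get?_mapVals g.items c]
          show (g.get? c).map pvBest = none
          rw [hgn]; rfl
        have hgd : g.getD c [] = [] :=
          PySem.Dict.getD_of_not_contains g [] (by simpa using hc)
        have hstep : pvStepA (PySem.Dict.mk (g.items.map pvF)) (c, lab, seq) =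
            PySem.Dict.mk ((pvStepG g (c, lab, seq)).items.map pvF) := by
          rw [hzip, hgd]
          have := pv_insert_mapVals g.items c [[lab, seq]]
          simp only [List.nil_append]
          rw [this]
          simp [pvStepA, hdget, pvBest, PySem.List.maxD, PySem.List.max?]
        rw [hstep]
        apply ih
        · intro p hp
          rw [hzip, hgd] at hp
          rcases (PySem.Dict.mem_items_insert _ _ _ _).mp hp with h | h
          · subst h; simp
          · exact h2 p h.1
        · rw [hzip]; exact PySem.Dict.nodup_keys_insert g c _ h3

-- ===== VERDICT (by name: the statement is the Claim_ definition above) =====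
theorem dict_builder_longer_spec : Claim_equal_dict_builder_longer := by
  intro seqs labs codes _
  unfold Spec_dict_builder_longer dict_builder_longer dict_builder_longer_alt
  have h := pv_loop (codes.zip (labs.zip seqs)) PySem.Dict.empty
    (by intro p hp; simp [PySem.Dict.empty] at hp)
    (by simp [PySem.Dict.keys, PySem.Dict.empty])
  have he : PySem.Dict.mk ((PySem.Dict.empty : PySem.Dict String (List (List String))).items.map pvF) =
      (PySem.Dict.empty : PySem.Dict String (List String)) := rfl
  rw [he] at h
  rw [h]
  simp [pvF, pvBest]
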